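-- pv_equiv track=rewrite | github.com/OJH0301/2024_2-_- | P-8/graph.py | create_adjacent_index_list
-- ===== SOURCE A (Python) =====
-- def create_adjacent_index_list(vertices, edges):
--     vertex_to_index = {vertex: idx for idx, vertex in enumerate(vertices)}
--
--     aList = [[] for _ in range(len(vertices))]
--
--     for edge in edges:
--         v1, v2 = edge.split('-')
--         idx1 = vertex_to_index[v1]
--         idx2 = vertex_to_index[v2]
--         aList[idx1].append(idx2)
--         aList[idx2].append(idx1)
--
--     return aList
-- ===== SOURCE B (Python) =====
-- def create_adjacent_index_list(vertices, edges):
--     vertex_to_index = {vertex: idx for idx, vertex in enumerate(vertices)}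
--
--     pairs = []
--     for edge in edges:
--         v1, v2 = edge.split('-')
--         pairs.append((vertex_to_index[v1], vertex_to_index[v2]))
--
--     result = []
--     for i in range(len(vertices)):
--         row = []
--         for a, b in pairs:
--             if a == i:
--                 row.append(b)
--             if b == i:
--                 row.append(a)
--         result.append(row)
--     return result
-- ===== Notes on version B (the rewrite author's own statement) =====
-- stated objective: alternative
-- what changed: A does one scatter pass appending into aList[idx1]/aList[idx2] per edge; B first builds a list of index pairs, then gathers each vertex's row by scanning the pairs per vertex index (scatter -> per-vertex gather), at O(V*E) instead of O(V+E).
import Mathlib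
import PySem

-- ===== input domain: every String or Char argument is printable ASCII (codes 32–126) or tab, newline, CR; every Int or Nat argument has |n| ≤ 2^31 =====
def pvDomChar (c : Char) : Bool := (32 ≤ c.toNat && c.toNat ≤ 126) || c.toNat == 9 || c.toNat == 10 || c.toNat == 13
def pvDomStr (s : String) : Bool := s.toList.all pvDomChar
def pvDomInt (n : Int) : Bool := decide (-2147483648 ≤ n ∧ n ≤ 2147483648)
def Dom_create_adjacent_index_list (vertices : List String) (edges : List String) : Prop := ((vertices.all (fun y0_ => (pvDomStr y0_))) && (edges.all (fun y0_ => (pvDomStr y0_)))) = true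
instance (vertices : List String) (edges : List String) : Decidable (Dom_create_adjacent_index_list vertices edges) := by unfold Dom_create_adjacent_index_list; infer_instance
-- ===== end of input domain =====

-- B replaces A's single scatter pass (append into aList[idx1]/aList[idx2] per edge) by a
-- parse-to-pairs pass followed by a per-vertex gather over the pairs: an alternative
-- decomposition of the same computation (return values proved equal on Pre_).

-- ===== PORT A =====
-- Python A: dict comprehension {vertex: idx}, aList of empty rows, then for each edge
-- split on '-', look up both endpoints, append each index to the other's row.
def create_adjacent_index_list (vertices : List String) (edges : List String) : List (List Int) :=
  let vertex_to_index : PySem.Dict String Int :=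
    (PySem.List.enumerate vertices 0).foldl (fun d p => d.insert p.2 p.1) PySem.Dict.empty
  let aList : List (List Int) := (List.range vertices.length).map (fun _ => ([] : List Int))
  edges.foldl (fun aList edge =>
    -- edge.split('-') with v1, v2 unpack; out-of-Pre_ failures (wrong arity, missing key)
    -- raise in Python and are excluded by Pre_; the port skips the edge there.
    match PySem.Str.split? edge "-" with
    | some [v1, v2] =>
      match vertex_to_index.get? v1, vertex_to_index.get? v2 with
      | some idx1, some idx2 =>
        let aList := aList.modify idx1.toNat (fun r => r ++ [idx2])
        aList.modify idx2.toNat (fun r => r ++ [idx1])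
      | _, _ => aList
    | _ => aList) aList

-- ===== PORT B =====
-- B's first pass: parse one edge and look up both endpoints (skip = the out-of-Pre_
-- raising cases of Python, as in port A).
def pvParseEdge (d : PySem.Dict String Int) (edge : String) : Option (Int × Int) :=
  -- edge.split('-'): sep is non-empty, so split? is always `some`; getD [] is exact
  let parts := (PySem.Str.split? edge "-").getD []
  if parts.length = 2 then
    (d.get? (parts.getD 0 "")).bind fun i1 =>
      (d.get? (parts.getD 1 "")).map fun i2 => (i1, i2)
  else none

def create_adjacent_index_list_alt (vertices : List String) (edges : List String) : List (List Int) :=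
  let vertex_to_index : PySem.Dict String Int :=
    (PySem.List.enumerate vertices 0).foldl (fun d p => d.insert p.2 p.1) PySem.Dict.empty
  let pairs : List (Int × Int) :=
    edges.foldl (fun ps edge =>
      match pvParseEdge vertex_to_index edge with
      | some p => ps ++ [p]
      | none => ps) []
  (PySem.List.pyRange 0 (vertices.length : Int) 1).foldl (fun result i =>
    result ++ [pairs.foldl (fun row p =>
      let row := if p.1 = i then row ++ [p.2] else row
      if p.2 = i then row ++ [p.1] else row) []]) []

-- ===== PRECONDITION & SPEC =====
-- Pre_ excludes exactly the inputs where Python A raises: an edge whose split('-') does not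
-- have exactly two parts (ValueError on unpack) or whose endpoint is not a vertex (KeyError).
def Pre_create_adjacent_index_list (vertices : List String) (edges : List String) : Prop :=
  ∀ e ∈ edges, ((PySem.Str.split? e "-").getD []).length = 2 ∧
    ∀ p ∈ (PySem.Str.split? e "-").getD [], p ∈ vertices

instance (vertices : List String) (edges : List String) : Decidable (Pre_create_adjacent_index_list vertices edges) := by unfold Pre_create_adjacent_index_list; infer_instance

def pvWitness_create_adjacent_index_list : List String × List String :=
  (["a", "b", "c"], ["a-b", "b-c", "a-a"])

def Spec_create_adjacent_index_list (vertices : List String) (edges : List String) (out : List (List Int)) : Prop := out = create_adjacent_index_list_alt vertices edges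
instance (vertices : List String) (edges : List String) (out : List (List Int)) : Decidable (Spec_create_adjacent_index_list vertices edges out) := by unfold Spec_create_adjacent_index_list; infer_instance

-- ===== CLAIM (what is proved, stated in full; the proofs are below) =====
def Claim_equal_create_adjacent_index_list : Prop := ∀ (vertices : List String) (edges : List String), Dom_create_adjacent_index_list vertices edges → Pre_create_adjacent_index_list vertices edges → Spec_create_adjacent_index_list vertices edges (create_adjacent_index_list vertices edges)

-- ===== LEMMAS AND PROOFS =====

-- One scatter step of port A.
def pvStep2 (L : List (List Int)) (p : Int × Int) : List (List Int) :=
  (L.modify p.1.toNat (fun r => r ++ [p.2])).modify p.2.toNat (fun r => r ++ [p.1])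

-- What one pair contributes to the row of vertex i.
def pvContrib (i : Int) (p : Int × Int) : List Int :=
  (if p.1 = i then [p.2] else []) ++ (if p.2 = i then [p.1] else [])

lemma pvPairs_eq_flatMap (d : PySem.Dict String Int) (edges : List String) (acc : List (Int × Int)) :
    edges.foldl (fun ps edge =>
      match pvParseEdge d edge with
      | some p => ps ++ [p]
      | none => ps) acc = acc ++ edges.flatMap (fun e => (pvParseEdge d e).toList) := by
  rw [← PySem.List.foldl_append_eq_flatMap (fun e => (pvParseEdge d e).toList) edges acc]
  apply PySem.List.foldl_congr_mem
  intro ps e _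
  rcases pvParseEdge d e with _ | p <;> simp

lemma pvScatter_eq_foldl_pairs (d : PySem.Dict String Int) (edges : List String) (L : List (List Int)) :
    edges.foldl (fun aList edge =>
      match PySem.Str.split? edge "-" with
      | some [v1, v2] =>
        match d.get? v1, d.get? v2 with
        | some idx1, some idx2 =>
          let aList := aList.modify idx1.toNat (fun r => r ++ [idx2])
          aList.modify idx2.toNat (fun r => r ++ [idx1])
        | _, _ => aList
      | _ => aList) L
    = (edges.flatMap (fun e => (pvParseEdge d e).toList)).foldl pvStep2 L := by
  induction edges generalizing L with
  | nil => simp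
  | cons e es ih =>
    simp only [List.foldl_cons, List.flatMap_cons, List.foldl_append]
    rw [ih]
    congr 1
    unfold pvParseEdge
    rcases h : PySem.Str.split? e "-" with _ | l
    · simp
    · match l with
      | [] => simp
      | [v] => simp
      | v1 :: v2 :: v3 :: t => simp
      | [v1, v2] =>
        rcases h1 : d.get? v1 with _ | i1 <;> rcases h2 : d.get? v2 with _ | i2 <;>
          simp [h1, h2, pvStep2]

-- Values stored in the enumerate-built dict are the indices of vertices.
lemma pvDict_values_aux (l : List (Int × String)) (d0 : PySem.Dict String Int)
    (v : String) (i : Int)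
    (h : (l.foldl (fun d p => d.insert p.2 p.1) d0).get? v = some i) :
    (∃ p ∈ l, p.1 = i) ∨ d0.get? v = some i := by
  induction l generalizing d0 with
  | nil => right; simpa using h
  | cons p l ih =>
    simp only [List.foldl_cons] at h
    rcases ih _ h with h' | h'
    · rcases h' with ⟨q, hq, hqi⟩
      exact Or.inl ⟨q, by simp [hq], hqi⟩
    · rw [PySem.Dict.get?_insert] at h'
      by_cases hv : v = p.2
      · simp [hv] at h'
        exact Or.inl ⟨p, by simp, h'⟩
      · simp [hv] at h'
        exact Or.inr h'

lemma pvDict_bound (vertices : List String) (v : String) (i : Int)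
    (h : ((PySem.List.enumerate vertices 0).foldl (fun d p => d.insert p.2 p.1)
          PySem.Dict.empty).get? v = some i) :
    0 ≤ i ∧ i < (vertices.length : Int) := by
  rcases pvDict_values_aux _ _ _ _ h with h' | h'
  · rcases h' with ⟨p, hp, hpi⟩
    have : p.1 ∈ (PySem.List.enumerate vertices 0).map (·.1) := List.mem_map_of_mem hp
    rw [PySem.List.map_fst_enumerate] at this
    rw [PySem.List.mem_pyRange_one] at this
    omega
  · simp [PySem.Dict.get?_empty] at h'

lemma pvParse_bound (n : Int) (d : PySem.Dict String Int)
    (hd : ∀ v i, d.get? v = some i → 0 ≤ i ∧ i < n) (e : String) (p : Int × Int)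
    (h : pvParseEdge d e = some p) :
    0 ≤ p.1 ∧ p.1 < n ∧ 0 ≤ p.2 ∧ p.2 < n := by
  unfold pvParseEdge at h
  rcases hs : PySem.Str.split? e "-" with _ | l <;> rw [hs] at h
  · simp at h
  · match l with
    | [] => simp at h
    | [v] => simp at h
    | v1 :: v2 :: v3 :: t => simp at h
    | [v1, v2] =>
      rcases h1 : d.get? v1 with _ | i1 <;> rcases h2 : d.get? v2 with _ | i2 <;>
        simp [h1, h2] at h
      subst h
      have b1 := hd v1 i1 h1
      have b2 := hd v2 i2 h2
      exact ⟨b1.1, b1.2, b2.1, b2.2⟩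

-- Scatter over in-range pairs = per-row gather of contributions.
lemma pvScatter_eq_mapIdx (P : List (Int × Int)) (L : List (List Int))
    (hP : ∀ p ∈ P, 0 ≤ p.1 ∧ p.1 < (L.length : Int) ∧ 0 ≤ p.2 ∧ p.2 < (L.length : Int)) :
    P.foldl pvStep2 L = L.mapIdx (fun k row => row ++ P.flatMap (pvContrib (k : Int))) := by
  induction P generalizing L with
  | nil =>
    simp only [List.foldl_nil, List.flatMap_nil, List.append_nil]
    apply List.ext_getElem <;> simp
  | cons p P ih =>
    simp only [List.foldl_cons]
    have hlen : (pvStep2 L p).length = L.length := by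
      simp [pvStep2, List.length_modify]
    rw [ih (pvStep2 L p) (by rw [hlen]; intro q hq; exact hP q (List.mem_cons_of_mem _ hq))]
    have hp := hP p (List.mem_cons_self ..)
    apply List.ext_getElem
    · simp [hlen]
    · intro k hk hk'
      have hkL : k < L.length := by simpa [hlen] using hk
      rw [List.getElem_mapIdx, List.getElem_mapIdx]
      show (pvStep2 L p)[k]'(by omega) ++ _ = _
      have e1 : (pvStep2 L p)[k]'(by omega)
          = L[k]'hkL ++ (if p.1 = (k : Int) then [p.2] else [])
              ++ (if p.2 = (k : Int) then [p.1] else []) := by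
        simp only [pvStep2, List.getElem_modify]
        have t1 : p.1.toNat = k ↔ p.1 = (k : Int) := by omega
        have t2 : p.2.toNat = k ↔ p.2 = (k : Int) := by omega
        by_cases c1 : p.1 = (k : Int) <;> by_cases c2 : p.2 = (k : Int) <;>
          simp [c1, c2, (fun h => (not_iff_not.mpr t1).mpr h : _),
                (fun h => (not_iff_not.mpr t2).mpr h : _)]
      rw [e1]
      simp [pvContrib, List.flatMap_cons, List.append_assoc]

-- The inner gather loop of port B collects the contributions of all pairs.
lemma pvGather_eq_flatMap (P : List (Int × Int)) (i : Int) (acc : List Int) :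
    P.foldl (fun row p =>
      let row := if p.1 = i then row ++ [p.2] else row
      if p.2 = i then row ++ [p.1] else row) acc = acc ++ P.flatMap (pvContrib i) := by
  rw [← PySem.List.foldl_append_eq_flatMap (pvContrib i) P acc]
  apply PySem.List.foldl_congr_mem
  intro row p _
  unfold pvContrib
  by_cases c1 : p.1 = i <;> by_cases c2 : p.2 = i <;> simp [c1, c2]

-- ===== VERDICT (by name: the statement is the Claim_ definition above) =====
theorem create_adjacent_index_list_spec : Claim_equal_create_adjacent_index_list := by
  intro vertices edges _ _
  unfold Spec_create_adjacent_index_list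
  simp only [create_adjacent_index_list, create_adjacent_index_list_alt]
  set d : PySem.Dict String Int :=
    (PySem.List.enumerate vertices 0).foldl (fun d p => d.insert p.2 p.1) PySem.Dict.empty with hd
  rw [pvScatter_eq_foldl_pairs, pvPairs_eq_flatMap, List.nil_append]
  set P : List (Int × Int) := edges.flatMap (fun e => (pvParseEdge d e).toList) with hP
  have hbound : ∀ p ∈ P, 0 ≤ p.1 ∧ p.1 < (vertices.length : Int)
      ∧ 0 ≤ p.2 ∧ p.2 < (vertices.length : Int) := by
    intro p hp
    rw [hP] at hp
    rcases List.mem_flatMap.mp hp with ⟨e, _, hpe⟩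
    exact pvParse_bound (vertices.length : Int) d
      (fun v i hvi => pvDict_bound vertices v i (hd ▸ hvi)) e p (by simpa using hpe)
  -- A side: scatter = mapIdx gather over the initial all-empty rows
  rw [pvScatter_eq_mapIdx P _ (by simpa using hbound)]
  -- B side: the outer loop appends one gathered row per i in range(len(vertices))
  rw [PySem.List.foldl_append_singleton_eq_map, List.nil_append,
      PySem.List.pyRange_zero_nat, List.map_map]
  apply List.ext_getElem
  · simp
  · intro k hk hk'
    rw [List.getElem_mapIdx]
    simp [pvGather_eq_flatMap]
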